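-- pv_equiv track=rewrite | github.com/marmust/GIT_SYNC | glitter_utils.py | least_chars_for_ascii_checksum
-- ===== SOURCE A (Python) =====
-- def least_chars_for_ascii_checksum(target):
--     """
--     create a string whose ASCII checksum equals the given target number using the least number of characters
--
--     parameters:
--     target (int): the target ASCII checksum value
--
--     returns:
--     str: the string with the least number of characters to achieve the given ASCII checksum
--     """
--     if target <= 0:
--         return ""
--
--     # max ascii value
--     max_ascii = 127
--
--     result = ""
--
--     # loop until target is 0
--     while target > 0:
--         if target >= max_ascii:
--             result += chr(max_ascii)
--             target -= max_ascii
--         else: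
--             result += chr(target)
--             target = 0
--
--     return result
-- ===== SOURCE B (Python) =====
-- def least_chars_for_ascii_checksum(target):
--     if target <= 0:
--         return ""
--     q, r = divmod(target, 127)
--     return chr(127) * q + (chr(r) if r else "")
-- ===== Notes on version B (the rewrite author's own statement) =====
-- stated objective: simpler
-- what changed: The repeated-subtraction while-loop accumulating one character per iteration is replaced by a single divmod closed form: replicate the max-ASCII character q times and append an optional remainder character, with no loop state.
import Mathlib
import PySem

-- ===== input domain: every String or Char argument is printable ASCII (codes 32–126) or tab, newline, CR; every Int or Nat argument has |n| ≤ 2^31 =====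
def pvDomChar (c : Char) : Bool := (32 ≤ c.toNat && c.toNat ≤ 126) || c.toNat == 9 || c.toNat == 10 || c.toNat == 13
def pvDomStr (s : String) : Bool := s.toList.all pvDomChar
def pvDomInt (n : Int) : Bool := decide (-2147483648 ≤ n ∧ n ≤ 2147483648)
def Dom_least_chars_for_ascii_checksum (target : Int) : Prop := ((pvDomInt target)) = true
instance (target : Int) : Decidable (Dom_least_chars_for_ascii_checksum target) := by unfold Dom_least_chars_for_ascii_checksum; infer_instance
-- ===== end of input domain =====

-- B replaces A's repeated-subtraction loop by one divmod: q copies of chr(127) plus an optional remainder character (simpler).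


-- ===== PORT A =====
-- the while-loop: result accumulates one character per iteration, target shrinks by 127 (or to 0)
def lcLoopA (result : List Char) (target : Int) : List Char :=
  if 0 < target then
    if 127 ≤ target then lcLoopA (result ++ [Char.ofNat 127]) (target - 127)
    else result ++ [Char.ofNat target.toNat]
  else result
termination_by target.toNat
decreasing_by omega

def least_chars_for_ascii_checksum (target : Int) : String :=
  if target ≤ 0 then "" else String.ofList (lcLoopA [] target)

-- ===== PORT B =====
def least_chars_for_ascii_checksum_alt (target : Int) : String :=
  if target ≤ 0 then ""
  else
    let q := PySem.Int.floordiv target 127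
    let r := PySem.Int.mod target 127
    String.ofList (List.replicate q.toNat (Char.ofNat 127) ++ (if r ≠ 0 then [Char.ofNat r.toNat] else []))

-- ===== PRECONDITION & SPEC =====
def Spec_least_chars_for_ascii_checksum (target : Int) (out : String) : Prop := out = least_chars_for_ascii_checksum_alt target
instance (target : Int) (out : String) : Decidable (Spec_least_chars_for_ascii_checksum target out) := by unfold Spec_least_chars_for_ascii_checksum; infer_instance

-- ===== CLAIM (what is proved, stated in full; the proofs are below) =====
def Claim_equal_least_chars_for_ascii_checksum : Prop := ∀ (target : Int), Dom_least_chars_for_ascii_checksum target → Spec_least_chars_for_ascii_checksum target (least_chars_for_ascii_checksum target)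

-- ===== LEMMAS AND PROOFS =====

-- the closed form that B builds (list-level)
def lcClosed (t : Int) : List Char :=
  List.replicate (PySem.Int.floordiv t 127).toNat (Char.ofNat 127) ++
    (if PySem.Int.mod t 127 ≠ 0 then [Char.ofNat (PySem.Int.mod t 127).toNat] else [])

lemma lcLoopA_eq_closed : ∀ (n : Nat) (t : Int), t.toNat = n → 0 < t →
    ∀ acc : List Char, lcLoopA acc t = acc ++ lcClosed t := by
  intro n
  induction n using Nat.strong_induction_on with
  | _ n ih =>
    intro t hn ht acc
    rw [lcLoopA]
    simp only [if_pos ht]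
    have hfd : PySem.Int.floordiv t 127 = t / 127 := PySem.Int.floordiv_eq_ediv_of_pos (by omega)
    have hmd : PySem.Int.mod t 127 = t % 127 := PySem.Int.mod_eq_emod_of_pos (by omega)
    by_cases h127 : 127 ≤ t
    · rw [if_pos h127]
      by_cases h0 : t - 127 = 0
      · -- t = 127: the recursive call returns its accumulator unchanged
        rw [lcLoopA]
        have ht127 : t = 127 := by omega
        subst ht127
        have hc : lcClosed 127 = [Char.ofNat 127] := by decide
        simp [hc]
      · have hlt : (t - 127).toNat < n := by omega
        rw [ih _ hlt _ rfl (by omega)]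
        have hfd' : PySem.Int.floordiv (t - 127) 127 = (t - 127) / 127 :=
          PySem.Int.floordiv_eq_ediv_of_pos (by omega)
        have hmd' : PySem.Int.mod (t - 127) 127 = (t - 127) % 127 :=
          PySem.Int.mod_eq_emod_of_pos (by omega)
        have hq : (t / 127).toNat = ((t - 127) / 127).toNat + 1 := by omega
        have hr : t % 127 = (t - 127) % 127 := by omega
        simp only [lcClosed]
        rw [hfd, hmd, hfd', hmd', hq, hr]
        simp [List.replicate_succ]
    · rw [if_neg h127]
      have hq : (t / 127).toNat = 0 := by omega
      have hr : t % 127 = t := by omega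
      simp only [lcClosed]
      rw [hfd, hmd, hq, hr, if_pos (by omega : t ≠ 0)]
      simp

-- ===== VERDICT (by name: the statement is the Claim_ definition above) =====
theorem least_chars_for_ascii_checksum_spec : Claim_equal_least_chars_for_ascii_checksum := by
  intro t _
  unfold Spec_least_chars_for_ascii_checksum least_chars_for_ascii_checksum least_chars_for_ascii_checksum_alt
  by_cases h : t ≤ 0
  · simp [h]
  · rw [if_neg h, if_neg h, lcLoopA_eq_closed t.toNat t rfl (by omega)]
    simp [lcClosed]
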